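-- pv_equiv track=rewrite | github.com/clips/dutchclinicalnegation | src/preprocessing.py | match_sentence_splitting_with_concepts
-- ===== SOURCE A (Python) =====
-- def match_sentence_splitting_with_concepts(spans, tokenized_sentences):
--     redistributed_sentences = []
--     tokenized_sentences = iter(tokenized_sentences)
--     current_sentence = []
--     while True:
--         try:
--             sentence = next(tokenized_sentences)
--         except StopIteration:
--             return redistributed_sentences
--         current_sentence += sentence
--         sentence_boundary = sentence[-1][1][1]
--         greenlight = True
--         for span in spans:
--             begin_index, end_index = span
--             if begin_index < sentence_boundary < end_index:
--                 greenlight = False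
--                 break
--         if greenlight:
--             redistributed_sentences.append(current_sentence)
--             current_sentence = []
--
--     raise ValueError('Process did not end successfully...')
-- ===== SOURCE B (Python) =====
-- def match_sentence_splitting_with_concepts(spans, tokenized_sentences):
--     # Sort spans once and keep a prefix-maximum of ends; each sentence boundary
--     # is then tested for a straddling span by one binary search.
--     ss = sorted(spans, key=lambda s: s[0])
--     begins = [b for b, _ in ss]
--     prefmax = []
--     m = None
--     for _, e in ss:
--         m = e if m is None or e > m else m
--         prefmax.append(m)
--
--     def straddled(x):
--         # rightmost insertion point of x among begins (count of begins < x)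
--         lo, hi = 0, len(begins)
--         while lo < hi:
--             mid = (lo + hi) // 2
--             if begins[mid] < x:
--                 lo = mid + 1
--             else:
--                 hi = mid
--         return lo > 0 and prefmax[lo - 1] > x
--
--     out = []
--     cur = []
--     for sentence in tokenized_sentences:
--         cur += sentence
--         if not straddled(sentence[-1][1][1]):
--             out.append(cur)
--             cur = []
--     return out
-- ===== Notes on version B (the rewrite author's own statement) =====
-- stated objective: alternative
-- what changed: Instead of scanning the whole span list for every sentence boundary, B sorts the spans once by begin, precomputes a prefix maximum of their ends, and answers each boundary query with one binary search.
import Mathlib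
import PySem

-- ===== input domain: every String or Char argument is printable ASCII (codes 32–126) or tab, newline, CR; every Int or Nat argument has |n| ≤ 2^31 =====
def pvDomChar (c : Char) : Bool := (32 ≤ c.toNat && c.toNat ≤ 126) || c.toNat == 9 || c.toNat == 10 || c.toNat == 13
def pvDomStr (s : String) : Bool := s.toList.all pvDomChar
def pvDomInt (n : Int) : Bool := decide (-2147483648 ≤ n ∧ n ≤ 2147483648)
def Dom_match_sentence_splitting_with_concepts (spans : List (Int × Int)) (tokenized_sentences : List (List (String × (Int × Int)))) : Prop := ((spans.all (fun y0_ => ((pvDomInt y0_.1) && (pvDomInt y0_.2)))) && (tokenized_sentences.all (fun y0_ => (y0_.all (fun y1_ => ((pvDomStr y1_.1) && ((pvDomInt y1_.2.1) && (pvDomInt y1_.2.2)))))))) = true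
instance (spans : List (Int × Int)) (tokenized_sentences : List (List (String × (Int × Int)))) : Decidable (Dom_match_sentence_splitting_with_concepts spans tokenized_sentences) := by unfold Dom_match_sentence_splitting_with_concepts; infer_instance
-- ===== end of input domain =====

-- B replaces A's per-sentence scan of all spans by sort + prefix-max-of-ends + one
-- binary search per sentence boundary (objective: alternative).

-- ===== PORT A =====
-- the while/for loop of A: walk the sentences, accumulating `cur`; flush it when no
-- span straddles the sentence boundary.  `none` from pyGet? = Python's IndexError on
-- an empty sentence (excluded by Pre_).
def pvA_loop (spans : List (Int × Int)) :
    List (List (String × (Int × Int))) → List (String × (Int × Int)) → List (List (String × (Int × Int)))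
  | [], _cur => []
  | sentence :: rest, cur =>
    let cur2 := cur ++ sentence
    match PySem.List.pyGet? sentence (-1) with
    | none => []  -- Python A raises IndexError here; outside Pre_
    | some tok =>
      let sb := tok.2.2
      if spans.any (fun sp => decide (sp.1 < sb) && decide (sb < sp.2)) then
        pvA_loop spans rest cur2
      else
        cur2 :: pvA_loop spans rest []

def match_sentence_splitting_with_concepts (spans : List (Int × Int)) (tokenized_sentences : List (List (String × (Int × Int)))) : List (List (String × (Int × Int))) :=
  pvA_loop spans tokenized_sentences []

-- ===== PORT B =====
-- prefix maximum of the ends of the sorted spans (B's `prefmax` loop, running max m)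
def pvB_prefmax : List (Int × Int) → Option Int → List Int
  | [], _ => []
  | p :: rest, m =>
    let m' := match m with
      | none => p.2
      | some mv => if p.2 > mv then p.2 else mv
    m' :: pvB_prefmax rest (some m')

-- B's hand-written binary search loop (lo/hi, mid = (lo+hi)//2); the fuel argument
-- only bounds the iteration count (hi - lo halves each step, so hi fuel suffices)
def pvB_bs (begins : List Int) (x : Int) : Nat → Nat → Nat → Nat
  | 0, lo, _hi => lo
  | fuel + 1, lo, hi =>
    if lo < hi then
      if begins.getD ((lo + hi) / 2) 0 < x then pvB_bs begins x fuel ((lo + hi) / 2 + 1) hi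
      else pvB_bs begins x fuel lo ((lo + hi) / 2)
    else lo

-- B's `straddled(x)`
def pvB_straddled (begins prefmax : List Int) (x : Int) : Bool :=
  let lo := pvB_bs begins x begins.length 0 begins.length
  decide (0 < lo) && decide (prefmax.getD (lo - 1) 0 > x)

-- B's sentence loop
def pvB_loop (begins prefmax : List Int) :
    List (List (String × (Int × Int))) → List (String × (Int × Int)) → List (List (String × (Int × Int)))
  | [], _cur => []
  | sentence :: rest, cur =>
    let cur2 := cur ++ sentence
    match PySem.List.pyGet? sentence (-1) with
    | none => []  -- Python B raises IndexError here; outside Pre_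
    | some tok =>
      if pvB_straddled begins prefmax tok.2.2 then
        pvB_loop begins prefmax rest cur2
      else
        cur2 :: pvB_loop begins prefmax rest []

def match_sentence_splitting_with_concepts_alt (spans : List (Int × Int)) (tokenized_sentences : List (List (String × (Int × Int)))) : List (List (String × (Int × Int))) :=
  let ss := PySem.List.sorted spans (fun s => s.1) false
  let begins := ss.map (fun s => s.1)
  let prefmax := pvB_prefmax ss none
  pvB_loop begins prefmax tokenized_sentences []

-- ===== PRECONDITION & SPEC =====
-- Pre_ excludes exactly the inputs with an empty sentence, on which Python A raises
-- IndexError at sentence[-1].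
def Pre_match_sentence_splitting_with_concepts (spans : List (Int × Int)) (tokenized_sentences : List (List (String × (Int × Int)))) : Prop :=
  ∀ s ∈ tokenized_sentences, s ≠ []
instance (spans : List (Int × Int)) (tokenized_sentences : List (List (String × (Int × Int)))) : Decidable (Pre_match_sentence_splitting_with_concepts spans tokenized_sentences) := by unfold Pre_match_sentence_splitting_with_concepts; infer_instance

def pvWitness_match_sentence_splitting_with_concepts : (List (Int × Int)) × (List (List (String × (Int × Int)))) :=
  ([(1, 5), (7, 9)], [[("a", (0, 2)), ("b", (2, 6))], [("c", (6, 8))], [("d", (8, 10))]])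

def Spec_match_sentence_splitting_with_concepts (spans : List (Int × Int)) (tokenized_sentences : List (List (String × (Int × Int)))) (out : List (List (String × (Int × Int)))) : Prop := out = match_sentence_splitting_with_concepts_alt spans tokenized_sentences
instance (spans : List (Int × Int)) (tokenized_sentences : List (List (String × (Int × Int)))) (out : List (List (String × (Int × Int)))) : Decidable (Spec_match_sentence_splitting_with_concepts spans tokenized_sentences out) := by unfold Spec_match_sentence_splitting_with_concepts; infer_instance

-- ===== CLAIM (what is proved, stated in full; the proofs are below) =====
def Claim_equal_match_sentence_splitting_with_concepts : Prop := ∀ (spans : List (Int × Int)) (tokenized_sentences : List (List (String × (Int × Int)))), Dom_match_sentence_splitting_with_concepts spans tokenized_sentences → Pre_match_sentence_splitting_with_concepts spans tokenized_sentences → Spec_match_sentence_splitting_with_concepts spans tokenized_sentences (match_sentence_splitting_with_concepts spans tokenized_sentences)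

-- ===== LEMMAS AND PROOFS =====

-- the binary search returns the count-of-smaller boundary on a sorted list
lemma pvB_bs_spec (begins : List Int) (x : Int)
    (hsort : begins.Pairwise (· ≤ ·)) :
    ∀ (fuel lo hi : Nat), hi - lo ≤ fuel → lo ≤ hi → hi ≤ begins.length →
    (∀ i, i < lo → begins.getD i 0 < x) →
    (∀ i, hi ≤ i → i < begins.length → ¬ begins.getD i 0 < x) →
    pvB_bs begins x fuel lo hi ≤ begins.length ∧
    (∀ i, i < pvB_bs begins x fuel lo hi → begins.getD i 0 < x) ∧
    (∀ i, pvB_bs begins x fuel lo hi ≤ i → i < begins.length → ¬ begins.getD i 0 < x) := by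
  have mono : ∀ i j, i ≤ j → j < begins.length → begins.getD i 0 ≤ begins.getD j 0 := by
    intro i j hij hj
    rcases Nat.eq_or_lt_of_le hij with rfl | h
    · exact le_rfl
    · rw [List.getD_eq_getElem _ _ (lt_trans h hj), List.getD_eq_getElem _ _ hj]
      exact List.pairwise_iff_getElem.mp hsort i j (lt_trans h hj) hj h
  intro fuel
  induction fuel with
  | zero =>
    intro lo hi hf hlo hhi hbelow habove
    simp only [pvB_bs]
    have : lo = hi := by omega
    subst this
    exact ⟨hhi, fun i hilt => hbelow i hilt, fun i h1 h2 => habove i h1 h2⟩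
  | succ fuel ih =>
    intro lo hi hf hlo hhi hbelow habove
    simp only [pvB_bs]
    by_cases h : lo < hi
    · rw [if_pos h]
      by_cases hlt : begins.getD ((lo + hi) / 2) 0 < x
      · rw [if_pos hlt]
        refine ih ((lo + hi) / 2 + 1) hi (by omega) (by omega) hhi ?_ habove
        intro i hilt
        rcases Nat.lt_succ_iff_lt_or_eq.mp hilt with h' | rfl
        · exact lt_of_le_of_lt (mono i ((lo + hi) / 2) (by omega) (by omega)) hlt
        · exact hlt
      · rw [if_neg hlt]
        refine ih lo ((lo + hi) / 2) (by omega) (by omega) (by omega) hbelow ?_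
        intro i h1 h2 hc
        exact hlt (lt_of_le_of_lt (mono ((lo + hi) / 2) i h1 h2) hc)
    · rw [if_neg h]
      exact ⟨by omega, fun i hilt => hbelow i hilt, fun i h1 h2 => habove i (by omega) h2⟩

-- prefmax[i] > x iff the carried max m exceeds x or some end among ss[0..i] exceeds x
lemma pvB_prefmax_spec (x : Int) :
    ∀ (ss : List (Int × Int)) (m : Option Int) (i : Nat), i < ss.length →
      ((pvB_prefmax ss m).getD i 0 > x ↔
        ((∃ mv, m = some mv ∧ mv > x) ∨ ∃ pr ∈ ss.take (i + 1), pr.2 > x)) := by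
  intro ss
  induction ss with
  | nil => intro m i hi; simp at hi
  | cons p rest ih =>
    intro m i hi
    have hm' : (match m with
        | none => p.2
        | some mv => if p.2 > mv then p.2 else mv) > x
        ↔ ((∃ mv, m = some mv ∧ mv > x) ∨ p.2 > x) := by
      cases m with
      | none => simp
      | some mv =>
        simp only [Option.some.injEq]
        constructor
        · intro h
          split at h
          · exact Or.inr h
          · exact Or.inl ⟨mv, rfl, h⟩
        · intro h
          rcases h with ⟨mv', hmv', hgt⟩ | hgt
          · cases hmv'; split <;> omega
          · split <;> omega
    cases i with
    | zero =>
      simp only [pvB_prefmax, List.getD_cons_zero, List.take_succ_cons, List.take_zero,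
        List.mem_cons, List.not_mem_nil, or_false]
      rw [hm']
      constructor
      · rintro (h | h)
        · exact Or.inl h
        · exact Or.inr ⟨p, rfl, h⟩
      · rintro (h | ⟨pr, rfl, h⟩)
        · exact Or.inl h
        · exact Or.inr h
    | succ k =>
      simp only [pvB_prefmax, List.getD_cons_succ, List.take_succ_cons, List.mem_cons]
      rw [ih _ k (by simpa using Nat.lt_of_succ_lt_succ hi)]
      simp only [Option.some.injEq]
      constructor
      · rintro (⟨mv, hmv, hgt⟩ | ⟨pr, hpr, hgt⟩)
        · cases hmv
          rcases hm'.mp hgt with h | h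
          · exact Or.inl h
          · exact Or.inr ⟨p, Or.inl rfl, h⟩
        · exact Or.inr ⟨pr, Or.inr hpr, hgt⟩
      · rintro (h | ⟨pr, hpr | hpr, hgt⟩)
        · exact Or.inl ⟨_, rfl, hm'.mpr (Or.inl h)⟩
        · exact Or.inl ⟨_, rfl, hm'.mpr (Or.inr (hpr ▸ hgt))⟩
        · exact Or.inr ⟨pr, hpr, hgt⟩

-- the straddle test of B computes exactly A's any-scan
lemma pvB_straddled_eq (spans : List (Int × Int)) (x : Int) :
    pvB_straddled ((PySem.List.sorted spans (fun s => s.1) false).map (fun s => s.1))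
      (pvB_prefmax (PySem.List.sorted spans (fun s => s.1) false) none) x
      = spans.any (fun sp => decide (sp.1 < x) && decide (x < sp.2)) := by
  set ss := PySem.List.sorted spans (fun s => s.1) false with hss
  set begins := ss.map (fun s => s.1) with hb
  have hlen : begins.length = ss.length := by rw [hb]; exact List.length_map ..
  have hsort : begins.Pairwise (· ≤ ·) := by
    rw [hb]
    exact List.pairwise_map.mpr (PySem.List.sorted_pairwise spans (fun s => s.1))
  have hget : ∀ j, j < ss.length → begins.getD j 0 = (ss.getD j (0, 0)).1 := by
    intro j hj
    rw [hb, List.getD_eq_getElem _ _ (by simpa using hj), List.getElem_map,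
      List.getD_eq_getElem _ _ hj]
  obtain ⟨hr1, hr2, hr3⟩ := pvB_bs_spec begins x hsort begins.length 0 begins.length
    (by omega) (by omega) le_rfl (by omega) (by omega)
  set r := pvB_bs begins x begins.length 0 begins.length with hrdef
  have hmem : ∀ sp : Int × Int, sp ∈ ss ↔ sp ∈ spans :=
    fun sp => (PySem.List.sorted_perm spans (fun s => s.1) false).mem_iff
  rw [Bool.eq_iff_iff]
  simp only [pvB_straddled, List.any_eq_true, Bool.and_eq_true, decide_eq_true_eq]
  constructor
  · rintro ⟨h0, hpf⟩
    have hr0 : 0 < r := h0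
    have hlt : r - 1 < ss.length := by omega
    rcases (pvB_prefmax_spec x ss none (r - 1) hlt).mp hpf with ⟨mv, hmv, _⟩ | ⟨pr, hpr, hgt⟩
    · cases hmv
    · rw [Nat.sub_add_cancel hr0] at hpr
      obtain ⟨j, hj, heq⟩ := List.mem_take_iff_getElem.mp hpr
      have hjr : j < r := lt_of_lt_of_le hj (min_le_left _ _)
      have hjlen : j < ss.length := lt_of_lt_of_le hj (min_le_right _ _)
      have hbx : begins.getD j 0 < x := hr2 j hjr
      rw [hget j hjlen, List.getD_eq_getElem _ _ hjlen, heq] at hbx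
      refine ⟨pr, (hmem pr).mp (heq ▸ List.getElem_mem hjlen), hbx, hgt⟩
  · rintro ⟨sp, hsp, h1, h2⟩
    obtain ⟨j, hjlen, heq⟩ := List.mem_iff_getElem.mp ((hmem sp).mpr hsp)
    have hbx : begins.getD j 0 < x := by
      rw [hget j hjlen, List.getD_eq_getElem _ _ hjlen, heq]; exact h1
    have hjr : j < r := by
      by_contra hc
      exact hr3 j (by omega) (by omega) hbx
    have hr0 : 0 < r := by omega
    refine ⟨hr0, ?_⟩
    have hlt : r - 1 < ss.length := by omega
    refine (pvB_prefmax_spec x ss none (r - 1) hlt).mpr (Or.inr ⟨sp, ?_, h2⟩)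
    rw [Nat.sub_add_cancel hr0]
    exact List.mem_take_iff_getElem.mpr ⟨j, by omega, heq⟩

-- the two sentence loops agree once the straddle test does
lemma pvB_loop_eq (spans : List (Int × Int)) (begins prefmax : List Int)
    (hpred : ∀ x, pvB_straddled begins prefmax x
      = spans.any (fun sp => decide (sp.1 < x) && decide (x < sp.2))) :
    ∀ (ts : List (List (String × (Int × Int)))) (cur : List (String × (Int × Int))),
      pvA_loop spans ts cur = pvB_loop begins prefmax ts cur := by
  intro ts
  induction ts with
  | nil => intro cur; rfl
  | cons s rest ih =>
    intro cur
    simp only [pvA_loop, pvB_loop]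
    cases PySem.List.pyGet? s (-1) with
    | none => rfl
    | some tok =>
      simp only [hpred, ih]

-- ===== VERDICT (by name: the statement is the Claim_ definition above) =====
theorem match_sentence_splitting_with_concepts_spec : Claim_equal_match_sentence_splitting_with_concepts := by
  intro spans ts _hdom _hpre
  unfold Spec_match_sentence_splitting_with_concepts
  unfold match_sentence_splitting_with_concepts match_sentence_splitting_with_concepts_alt
  exact pvB_loop_eq spans _ _ (fun x => pvB_straddled_eq spans x) ts []
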